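-- pv_equiv track=rewrite | github.com/hassanshamim/adventofcode | 2015/11_passwords.py | next_word
-- ===== SOURCE A (Python) =====
-- FORBIDDEN = {'i', 'o', 'l'}
--
-- def next_word(pw):
--     ''' if input word is not valid, calculate the next valid word by rule 2.
--         Not necessarily a valid password
--     '''
--     if not any(char in pw for char in FORBIDDEN):
--         return pw
--
--     replacements = {'i': 'j', 'o': 'p', 'l': 'm'}
--     for char in replacements:
--         i = pw.find(char)
--         if i == -1:
--             continue
--         pw = pw[:i] + replacements[pw[i]] +  'a' * len(pw[i+1:])
--     return pw
-- ===== SOURCE B (Python) =====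
-- MAPPING = {'i': 'j', 'o': 'p', 'l': 'm'}
--
--
-- def next_word(pw):
--     ''' if input word is not valid, calculate the next valid word by rule 2.
--         Not necessarily a valid password
--     '''
--     for idx, ch in enumerate(pw):
--         if ch in MAPPING:
--             return pw[:idx] + MAPPING[ch] + 'a' * (len(pw) - idx - 1)
--     return pw
-- ===== Notes on version B (the rewrite author's own statement) =====
-- stated objective: simpler
-- what changed: B replaces A's membership pre-check plus three sequential find-and-replace passes (one per forbidden letter, converging by re-padding) with a single left-to-right scan that stops at the first forbidden letter and builds the result once.
import Mathlib
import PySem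

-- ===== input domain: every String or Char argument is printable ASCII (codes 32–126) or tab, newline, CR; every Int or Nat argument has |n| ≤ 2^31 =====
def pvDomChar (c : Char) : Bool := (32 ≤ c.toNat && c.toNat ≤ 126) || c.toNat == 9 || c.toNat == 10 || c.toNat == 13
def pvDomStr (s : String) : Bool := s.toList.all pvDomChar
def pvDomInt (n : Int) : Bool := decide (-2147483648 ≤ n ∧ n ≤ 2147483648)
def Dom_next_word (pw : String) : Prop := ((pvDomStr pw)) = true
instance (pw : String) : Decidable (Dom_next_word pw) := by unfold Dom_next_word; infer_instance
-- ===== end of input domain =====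

-- B replaces A's forbidden-letter pre-check plus three sequential find-and-replace passes
-- with a single scan that rewrites at the first forbidden letter (objective: simpler).


-- ===== PORT A =====
-- the i→j, o→p, l→m replacement map (A's 'replacements' dict = B's 'MAPPING'; default never hit)
def pvRepl (c : Char) : Char :=
  if c = 'i' then 'j' else if c = 'o' then 'p' else if c = 'l' then 'm' else c

-- one iteration of A's loop body on the character list:
-- i = pw.find(char); if i == -1: continue; pw = pw[:i] + replacements[pw[i]] + 'a' * len(pw[i+1:])
def pvStepA (l : List Char) (c : Char) : List Char :=
  match List.findIdx? (· = c) l with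
  | none => l
  | some i => l.take i ++ [pvRepl (l.getD i 'a')] ++ List.replicate (l.length - i - 1) 'a'

def next_word (pw : String) : String :=
  let l := pw.toList
  -- if not any(char in pw for char in FORBIDDEN): return pw  (set membership tests, order-independent)
  if !(l.contains 'i' || l.contains 'o' || l.contains 'l') then pw
  else
    -- for char in replacements: … (dict iteration order: 'i', 'o', 'l')
    String.ofList (pvStepA (pvStepA (pvStepA l 'i') 'o') 'l')

-- ===== PORT B =====
def pvForb (c : Char) : Bool := c = 'i' || c = 'o' || c = 'l'

-- B's single scan: at the first forbidden character, replace it and pad the rest with 'a';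
-- if none is found the whole list is rebuilt unchanged (B returns pw).
def pvAltGo : List Char → List Char
  | [] => []
  | c :: rest =>
      if pvForb c then pvRepl c :: List.replicate rest.length 'a'
      else c :: pvAltGo rest

def next_word_alt (pw : String) : String := String.ofList (pvAltGo pw.toList)

-- ===== PRECONDITION & SPEC =====
def Spec_next_word (pw : String) (out : String) : Prop := out = next_word_alt pw
instance (pw : String) (out : String) : Decidable (Spec_next_word pw out) := by unfold Spec_next_word; infer_instance

-- ===== CLAIM (what is proved, stated in full; the proofs are below) =====
def Claim_equal_next_word : Prop := ∀ (pw : String), Dom_next_word pw → Spec_next_word pw (next_word pw)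

-- ===== LEMMAS AND PROOFS =====

-- a scan that finds no forbidden character returns the list unchanged
theorem pvAltGo_of_no_forb (l : List Char) (h : ∀ x ∈ l, pvForb x = false) :
    pvAltGo l = l := by
  induction l with
  | nil => rfl
  | cons c rest ih =>
      simp [pvAltGo, h c (by simp)]
      exact ih (fun x hx => h x (by simp [hx]))

theorem pvStepA_of_not_mem (l : List Char) (c : Char) (h : c ∉ l) :
    pvStepA l c = l := by
  unfold pvStepA
  have : List.findIdx? (· = c) l = none := by
    simp [List.findIdx?_eq_none_iff]
    intro x hx hxc; exact absurd (hxc ▸ hx) h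
  simp [this]

theorem pvStepA_length (l : List Char) (c : Char) : (pvStepA l c).length = l.length := by
  unfold pvStepA
  cases hf : List.findIdx? (· = c) l with
  | none => rfl
  | some i =>
      have hi : i < l.length := (List.findIdx?_eq_some_iff_findIdx_eq.mp hf).1
      simp; omega

theorem pvStepA_cons_self (c : Char) (rest : List Char) :
    pvStepA (c :: rest) c = pvRepl c :: List.replicate rest.length 'a' := by
  unfold pvStepA
  simp [List.findIdx?_cons]

theorem pvStepA_cons_ne (c x : Char) (rest : List Char) (h : c ≠ x) :
    pvStepA (c :: rest) x = c :: pvStepA rest x := by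
  unfold pvStepA
  rw [List.findIdx?_cons]
  simp only [h, decide_false]
  cases hf : List.findIdx? (· = x) rest with
  | none => simp
  | some i =>
      have hi : i < rest.length := (List.findIdx?_eq_some_iff_findIdx_eq.mp hf).1
      simp

-- a replaced head followed by 'a'-padding contains no forbidden character, so later passes skip it
theorem pvStepA_repl_tail (c x : Char) (n : Nat) (hc : pvForb c = true) (hx : pvForb x = true) :
    pvStepA (pvRepl c :: List.replicate n 'a') x = pvRepl c :: List.replicate n 'a' := by
  apply pvStepA_of_not_mem
  simp only [pvForb, Bool.or_eq_true, decide_eq_true_eq] at hc hx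
  rcases hc with (hc | hc) | hc <;> rcases hx with (hx | hx) | hx <;> subst hc <;> subst hx <;>
    simp [pvRepl, List.mem_replicate]

-- key lemma: A's three passes equal B's single scan on any list containing a forbidden character
theorem pvTriple_eq_altGo (l : List Char) (h : l.any pvForb = true) :
    pvStepA (pvStepA (pvStepA l 'i') 'o') 'l' = pvAltGo l := by
  induction l with
  | nil => simp at h
  | cons c rest ih =>
      by_cases hci : c = 'i'
      · subst hci
        rw [pvStepA_cons_self]
        rw [pvStepA_repl_tail 'i' 'o' _ (by decide) (by decide),
            pvStepA_repl_tail 'i' 'l' _ (by decide) (by decide)]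
        simp [pvAltGo, pvForb]
      · by_cases hco : c = 'o'
        · subst hco
          rw [pvStepA_cons_ne _ _ _ (by decide), pvStepA_cons_self,
              pvStepA_length, pvStepA_repl_tail 'o' 'l' _ (by decide) (by decide)]
          simp [pvAltGo, pvForb]
        · by_cases hcl : c = 'l'
          · subst hcl
            rw [pvStepA_cons_ne _ _ _ (by decide), pvStepA_cons_ne _ _ _ (by decide),
                pvStepA_cons_self, pvStepA_length, pvStepA_length]
            simp [pvAltGo, pvForb]
          · have hcf : pvForb c = false := by
              simp [pvForb, hci, hco, hcl]
            rw [pvStepA_cons_ne _ _ _ hci, pvStepA_cons_ne _ _ _ hco,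
                pvStepA_cons_ne _ _ _ hcl]
            have hrest : rest.any pvForb = true := by
              simpa [List.any_cons, hcf] using h
            rw [ih hrest]
            simp [pvAltGo, hcf]

-- ===== VERDICT (by name: the statement is the Claim_ definition above) =====
theorem next_word_spec : Claim_equal_next_word := by
  intro pw _
  unfold Spec_next_word next_word next_word_alt
  dsimp only
  by_cases h : pw.toList.any pvForb = true
  · have hc : (pw.toList.contains 'i' || pw.toList.contains 'o' || pw.toList.contains 'l') = true := by
      simp only [List.any_eq_true, pvForb, Bool.or_eq_true, decide_eq_true_eq] at h
      obtain ⟨x, hx, hfx⟩ := h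
      rcases hfx with (h1 | h1) | h1 <;> subst h1 <;>
        simp [List.contains_eq_mem, hx]
    rw [hc]
    simp only [Bool.not_true, Bool.false_eq_true, if_false]
    rw [pvTriple_eq_altGo _ h]
  · have hall : ∀ x ∈ pw.toList, pvForb x = false := by
      simpa [List.any_eq_true] using h
    have hc : (pw.toList.contains 'i' || pw.toList.contains 'o' || pw.toList.contains 'l') = false := by
      simp only [Bool.or_eq_false_iff, List.contains_eq_mem, decide_eq_false_iff_not]
      refine ⟨⟨fun hm => ?_, fun hm => ?_⟩, fun hm => ?_⟩ <;>
        · have := hall _ hm; simp [pvForb] at this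
    rw [hc, pvAltGo_of_no_forb _ hall, String.ofList_toList]
    simp
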